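-- pv_equiv track=rewrite | github.com/cvsper/Akali | purple/validation/detection_monitor.py | correlate_detections
-- ===== SOURCE A (Python) =====
-- from typing import Dict, List, Optional, Callable
--
-- def correlate_detections(detections: List[Dict]) -> Dict:
--     """
--     Correlate detections by source IP or other attributes.
--
--     Args:
--         detections: List of detections
--
--     Returns:
--         Correlated detections dictionary
--     """
--     correlated = {}
--
--     for detection in detections:
--         # Group by source IP
--         source_ip = detection.get('source_ip', 'unknown')
--
--         if source_ip not in correlated:
--             correlated[source_ip] = []
--
--         correlated[source_ip].append(detection)
--
--     return correlated
-- ===== SOURCE B (Python) =====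
-- def correlate_detections(detections):
--     """Two-phase grouping: collect distinct keys in first-occurrence order,
--     then build each group with a filtered pass over the list."""
--     keys = list(dict.fromkeys(d.get('source_ip', 'unknown') for d in detections))
--     return {k: [d for d in detections if d.get('source_ip', 'unknown') == k]
--             for k in keys}
-- ===== Notes on version B (the rewrite author's own statement) =====
-- stated objective: alternative
-- what changed: Replaces A's single accumulating dict pass (insert-empty-then-append per detection) with a two-phase build: dedup the keys in first-occurrence order, then one filtered pass over the list per key.
import Mathlib
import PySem

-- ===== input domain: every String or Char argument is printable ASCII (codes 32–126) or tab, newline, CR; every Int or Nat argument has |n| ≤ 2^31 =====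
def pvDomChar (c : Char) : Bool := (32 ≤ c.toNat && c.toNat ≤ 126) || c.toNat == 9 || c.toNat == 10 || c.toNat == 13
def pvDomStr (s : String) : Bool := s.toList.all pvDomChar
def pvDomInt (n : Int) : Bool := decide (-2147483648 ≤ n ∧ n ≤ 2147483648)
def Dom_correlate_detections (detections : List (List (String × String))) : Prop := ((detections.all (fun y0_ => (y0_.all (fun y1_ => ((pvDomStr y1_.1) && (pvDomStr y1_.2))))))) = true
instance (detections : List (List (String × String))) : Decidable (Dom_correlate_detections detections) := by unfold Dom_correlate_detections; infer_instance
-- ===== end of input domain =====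

-- B replaces A's single accumulating dict pass by a two-phase build: dedup the keys, then one filtered pass per key (alternative decomposition, not faster).

-- shared helper: detection.get('source_ip', 'unknown')
def pvKey (d : List (String × String)) : String :=
  (PySem.Dict.ofList d).getD "source_ip" "unknown"

-- ===== PORT A =====
def correlate_detections (detections : List (List (String × String))) : List (String × List (List (String × String))) :=
  (detections.foldl
    (fun correlated detection =>
      let source_ip := pvKey detection
      let correlated := if correlated.contains source_ip then correlated
                        else correlated.insert source_ip []
      correlated.modify source_ip [] (· ++ [detection]))
    PySem.Dict.empty).items

-- ===== PORT B =====
def correlate_detections_alt (detections : List (List (String × String))) : List (String × List (List (String × String))) :=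
  let keys := PySem.List.dedup (detections.map pvKey)
  keys.map (fun k => (k, detections.filter (fun d => pvKey d == k)))

-- ===== PRECONDITION & SPEC =====
def Spec_correlate_detections (detections : List (List (String × String))) (out : List (String × List (List (String × String)))) : Prop := out = correlate_detections_alt detections
instance (detections : List (List (String × String))) (out : List (String × List (List (String × String)))) : Decidable (Spec_correlate_detections detections out) := by unfold Spec_correlate_detections; infer_instance

-- ===== CLAIM (what is proved, stated in full; the proofs are below) =====
def Claim_equal_correlate_detections : Prop := ∀ (detections : List (List (String × String))), Dom_correlate_detections detections → Spec_correlate_detections detections (correlate_detections detections)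

-- ===== LEMMAS AND PROOFS =====

-- 'ensure key present, then append' is exactly Dict.modify with default []
theorem step_eq_modify (acc : PySem.Dict String (List (List (String × String))))
    (k : String) (d : List (String × String)) :
    (if acc.contains k then acc else acc.insert k []).modify k [] (· ++ [d])
      = acc.modify k [] (· ++ [d]) := by
  by_cases h : acc.contains k = true
  · simp [h]
  · have h' : acc.contains k = false := by simpa using h
    simp [h', PySem.Dict.modify, PySem.Dict.insert_insert_self,
      PySem.Dict.getD_insert_self, PySem.Dict.getD_of_not_contains _ _ h']

theorem fold_as_pairs (detections : List (List (String × String))) :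
    detections.foldl
      (fun correlated detection =>
        let source_ip := pvKey detection
        let correlated := if correlated.contains source_ip then correlated
                          else correlated.insert source_ip []
        correlated.modify source_ip [] (· ++ [detection]))
      PySem.Dict.empty
    = (detections.map (fun d => (pvKey d, d))).foldl
        (fun acc p => acc.modify p.1 [] (· ++ [p.2])) PySem.Dict.empty := by
  rw [List.foldl_map]
  exact PySem.List.foldl_congr_mem _ _ _ _
    (fun acc x _ => step_eq_modify acc (pvKey x) x)

-- ===== VERDICT (by name: the statement is the Claim_ definition above) =====
theorem correlate_detections_spec : Claim_equal_correlate_detections := by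
  intro detections _
  show correlate_detections detections = correlate_detections_alt detections
  unfold correlate_detections correlate_detections_alt
  rw [fold_as_pairs]
  have hnd : (((detections.map (fun d => (pvKey d, d))).foldl
      (fun (acc : PySem.Dict String (List (List (String × String))))
           (p : String × List (String × String)) => acc.modify p.1 [] (· ++ [p.2]))
      PySem.Dict.empty)).keys.Nodup := by
    exact PySem.Dict.nodup_keys_foldl_modify_key
      (detections.map (fun d => (pvKey d, d)))
      (Prod.fst : String × List (String × String) → String) []
      (fun _ p xs => xs ++ [p.2]) PySem.Dict.empty (by simp [PySem.Dict.keys, PySem.Dict.empty])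
  rw [PySem.Dict.items_eq_map_keys _ hnd []]
  have hkeys : (((detections.map (fun d => (pvKey d, d))).foldl
      (fun (acc : PySem.Dict String (List (List (String × String))))
           (p : String × List (String × String)) => acc.modify p.1 [] (· ++ [p.2]))
      PySem.Dict.empty)).keys
      = PySem.List.dedup (detections.map pvKey) := by
    rw [PySem.Dict.keys_foldl_modify_key (detections.map (fun d => (pvKey d, d)))
      (Prod.fst : String × List (String × String) → String)
      [] (fun _ p xs => xs ++ [p.2])]
    simp [PySem.Dict.keys, PySem.Dict.empty, PySem.Set.update_nil_left,
      List.map_map, Function.comp_def]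
  rw [hkeys]
  refine List.map_congr_left (fun k hk => ?_)
  rw [PySem.Dict.getD_foldl_modify_append]
  simp [PySem.Dict.getD_empty, List.filter_map, List.map_map, Function.comp_def]
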